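-- pv_equiv track=rewrite | github.com/MF-Guilherme/Beecrowd | Iniciante/bee1132_multiplos_de_13.py | soma_nao_divisiveis_treze
-- ===== SOURCE A (Python) =====
-- def soma_nao_divisiveis_treze(n1, n2):
--     lista_completa = []
--     lista_nao_divisiveis = []
--     if n2 < n1:
--         for i in range(n2, n1 + 1):
--             lista_completa.append(i)
--     else:
--         for i in range(n1, n2 + 1):
--             lista_completa.append(i)
--     for numero in lista_completa:
--         if numero % 13 != 0:
--             lista_nao_divisiveis.append(numero)
--     return sum(lista_nao_divisiveis)
-- ===== SOURCE B (Python) =====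
-- def soma_nao_divisiveis_treze(n1, n2):
--     lo, hi = (n2, n1) if n2 < n1 else (n1, n2)
--     total = (lo + hi) * (hi - lo + 1) // 2
--     k_lo = -((-lo) // 13)          # ceil(lo / 13): smallest k with 13*k >= lo
--     k_hi = hi // 13                # floor(hi / 13): largest k with 13*k <= hi
--     multiples = 13 * (k_lo + k_hi) * (k_hi - k_lo + 1) // 2
--     return total - multiples
-- ===== Notes on version B (the rewrite author's own statement) =====
-- stated objective: faster
-- what changed: Replaced the O(n) build-a-list-then-filter-then-sum loops with an O(1) closed form: arithmetic-series sum of the whole range minus the arithmetic-series sum of the multiples of 13 in it.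
import Mathlib
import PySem

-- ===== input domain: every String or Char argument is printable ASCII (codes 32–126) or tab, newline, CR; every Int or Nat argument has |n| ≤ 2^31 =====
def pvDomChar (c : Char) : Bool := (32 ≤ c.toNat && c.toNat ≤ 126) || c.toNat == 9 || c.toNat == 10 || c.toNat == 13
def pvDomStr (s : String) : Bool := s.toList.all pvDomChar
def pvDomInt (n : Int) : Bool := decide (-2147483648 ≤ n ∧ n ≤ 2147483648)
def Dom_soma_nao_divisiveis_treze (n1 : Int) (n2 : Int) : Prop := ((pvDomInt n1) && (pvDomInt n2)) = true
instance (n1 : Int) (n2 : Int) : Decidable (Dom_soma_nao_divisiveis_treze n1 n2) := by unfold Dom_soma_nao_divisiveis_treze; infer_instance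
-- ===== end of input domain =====

-- B replaces A's O(n) list-building/filter/sum loops with an O(1) closed form
-- (total arithmetic series minus the series of multiples of 13).

-- ===== PORT A =====
-- Python's O(1) list append is transcribed as the cons-accumulator + final
-- reverse idiom (same loop, same resulting list; Lean's ++ [i] would be quadratic).
def soma_nao_divisiveis_treze (n1 : Int) (n2 : Int) : Int :=
  let lista_completa : List Int :=
    (if n2 < n1 then
      (PySem.List.pyRange n2 (n1 + 1) 1).foldl (fun acc i => i :: acc) []
    else
      (PySem.List.pyRange n1 (n2 + 1) 1).foldl (fun acc i => i :: acc) []).reverse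
  let lista_nao_divisiveis : List Int :=
    (lista_completa.foldl
      (fun acc numero => if PySem.Int.mod numero 13 ≠ 0 then numero :: acc else acc) []).reverse
  lista_nao_divisiveis.foldl (fun acc x => acc + x) 0

-- ===== PORT B =====
def soma_nao_divisiveis_treze_alt (n1 : Int) (n2 : Int) : Int :=
  let p : Int × Int := if n2 < n1 then (n2, n1) else (n1, n2)
  let lo := p.1
  let hi := p.2
  let total := PySem.Int.floordiv ((lo + hi) * (hi - lo + 1)) 2
  let k_lo := -(PySem.Int.floordiv (-lo) 13)
  let k_hi := PySem.Int.floordiv hi 13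
  let multiples := PySem.Int.floordiv (13 * (k_lo + k_hi) * (k_hi - k_lo + 1)) 2
  total - multiples

-- ===== PRECONDITION & SPEC =====
def Spec_soma_nao_divisiveis_treze (n1 : Int) (n2 : Int) (out : Int) : Prop := out = soma_nao_divisiveis_treze_alt n1 n2
instance (n1 : Int) (n2 : Int) (out : Int) : Decidable (Spec_soma_nao_divisiveis_treze n1 n2 out) := by unfold Spec_soma_nao_divisiveis_treze; infer_instance

-- ===== CLAIM (what is proved, stated in full; the proofs are below) =====
def Claim_equal_soma_nao_divisiveis_treze : Prop := ∀ (n1 : Int) (n2 : Int), Dom_soma_nao_divisiveis_treze n1 n2 → Spec_soma_nao_divisiveis_treze n1 n2 (soma_nao_divisiveis_treze n1 n2)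

-- ===== LEMMAS AND PROOFS =====

-- Key invariant: twice the filtered sum over pyRange lo (lo+n) equals the
-- total-series polynomial minus the multiples-of-13 series polynomial.
theorem pvKey : ∀ (n : Nat) (lo : Int),
    2 * (((PySem.List.pyRange lo (lo + (n : Int)) 1).filter
        (fun x => decide (¬ PySem.Int.mod x 13 = 0))).foldl (fun a x => a + x) 0)
    = (2 * lo + (n : Int) - 1) * (n : Int)
      - 13 * ((-((-lo) / 13)) + (lo + (n : Int) - 1) / 13)
          * ((lo + (n : Int) - 1) / 13 - (-((-lo) / 13)) + 1) := by
  intro n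
  induction n with
  | zero =>
    intro lo
    rw [PySem.List.pyRange_one_eq_nil (by omega)]
    have hB : (lo + (0 : Nat) - 1) / 13 - (-((-lo) / 13)) + 1 = 0 := by omega
    rw [hB]
    simp
  | succ n ih =>
    intro lo
    have hsplit : PySem.List.pyRange lo (lo + ((n + 1 : Nat) : Int)) 1
        = PySem.List.pyRange lo (lo + (n : Int)) 1 ++ [lo + (n : Int)] := by
      have : lo + ((n + 1 : Nat) : Int) = (lo + (n : Int)) + 1 := by push_cast; ring
      rw [this, PySem.List.pyRange_one_succ_right (by omega)]
    rw [hsplit, List.filter_append]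
    have hmod : PySem.Int.mod (lo + (n : Int)) 13 = (lo + (n : Int)) % 13 :=
      PySem.Int.mod_eq_emod_of_pos (by norm_num)
    by_cases h : (lo + (n : Int)) % 13 = 0
    · -- the new element is a multiple of 13: dropped by the filter
      have hfil : List.filter (fun x => decide (¬ PySem.Int.mod x 13 = 0)) [lo + (n : Int)] = [] := by
        simp only [List.filter_cons, List.filter_nil, hmod]
        simp
        omega
      rw [hfil, List.append_nil]
      have hk' : (lo + ((n + 1 : Nat) : Int) - 1) / 13 = (lo + (n : Int) - 1) / 13 + 1 := by
        push_cast; omega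
      have h13 : 13 * ((lo + (n : Int) - 1) / 13 + 1) = lo + (n : Int) := by omega
      rw [hk']
      push_cast
      linear_combination ih lo + 2 * h13
    · -- the new element is kept
      have hfil : List.filter (fun x => decide (¬ PySem.Int.mod x 13 = 0)) [lo + (n : Int)]
          = [lo + (n : Int)] := by
        simp only [List.filter_cons, List.filter_nil, hmod]
        simp
        omega
      rw [hfil, List.foldl_append]
      simp only [List.foldl_cons, List.foldl_nil]
      have hk' : (lo + ((n + 1 : Nat) : Int) - 1) / 13 = (lo + (n : Int) - 1) / 13 := by
        push_cast; omega
      rw [hk']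
      push_cast
      linear_combination ih lo

-- The product in the multiples series is always even.
theorem pvEven (a k : Int) : ∃ m, (a + k) * (k - a + 1) = 2 * m := by
  rcases Int.even_or_odd (a + k) with ⟨t, ht⟩ | ⟨t, ht⟩
  · exact ⟨t * (k - a + 1), by rw [ht]; ring⟩
  · refine ⟨(2 * t + 1) * (k - t), ?_⟩
    have h2 : k - a + 1 = 2 * (k - t) := by omega
    rw [ht, h2]; ring

-- The cons-accumulator loops build the list resp. its filtering (reversed).
theorem pvConsRev (l : List Int) : ∀ acc : List Int,
    l.foldl (fun acc i => i :: acc) acc = l.reverse ++ acc := by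
  induction l with
  | nil => intro acc; simp
  | cons x xs ih => intro acc; simp [List.foldl_cons, ih]

theorem pvFilterRev (l : List Int) : ∀ acc : List Int,
    l.foldl (fun acc numero => if PySem.Int.mod numero 13 ≠ 0 then numero :: acc else acc) acc
      = (l.filter (fun x => decide (¬ PySem.Int.mod x 13 = 0))).reverse ++ acc := by
  induction l with
  | nil => intro acc; simp
  | cons x xs ih =>
    intro acc
    rw [List.foldl_cons, List.filter_cons]
    by_cases h : PySem.Int.mod x 13 ≠ 0
    · have hd : decide (¬ PySem.Int.mod x 13 = 0) = true := by simpa using h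
      rw [if_pos h, ih, hd]
      simp
    · have hd : decide (¬ PySem.Int.mod x 13 = 0) = false := by simpa using h
      rw [if_neg h, ih, hd]
      simp

-- One in-order range [lo, hi]: filtered sum equals B's closed form.
theorem pvMain (lo hi : Int) (h : lo ≤ hi) :
    (((((PySem.List.pyRange lo (hi + 1) 1).foldl (fun acc i => i :: acc) []).reverse.foldl
        (fun acc numero => if PySem.Int.mod numero 13 ≠ 0 then numero :: acc else acc)
        []).reverse).foldl (fun acc x => acc + x) 0)
    = PySem.Int.floordiv ((lo + hi) * (hi - lo + 1)) 2
      - PySem.Int.floordiv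
          (13 * ((-(PySem.Int.floordiv (-lo) 13)) + PySem.Int.floordiv hi 13)
            * (PySem.Int.floordiv hi 13 - (-(PySem.Int.floordiv (-lo) 13)) + 1)) 2 := by
  have hbuild : ((PySem.List.pyRange lo (hi + 1) 1).foldl (fun acc i => i :: acc) []).reverse
      = PySem.List.pyRange lo (hi + 1) 1 := by
    rw [pvConsRev]; simp
  rw [hbuild, pvFilterRev, List.append_nil, List.reverse_reverse]
  set n : Nat := (hi + 1 - lo).toNat with hn
  have hcast : (n : Int) = hi + 1 - lo := by
    rw [hn]; exact Int.toNat_of_nonneg (by omega)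
  have hrange : hi + 1 = lo + (n : Int) := by omega
  have hkey := pvKey n lo
  -- rewrite floordivs into ediv and express everything over lo, n
  rw [PySem.Int.floordiv_eq_ediv_of_pos (by norm_num : (0:Int) < 2),
      PySem.Int.floordiv_eq_ediv_of_pos (by norm_num : (0:Int) < 2),
      PySem.Int.floordiv_eq_ediv_of_pos (by norm_num : (0:Int) < 13),
      PySem.Int.floordiv_eq_ediv_of_pos (by norm_num : (0:Int) < 13)]
  rw [hrange]
  have h11 : hi = lo + (n : Int) - 1 := by omega
  rw [h11]
  set a : Int := -((-lo) / 13) with ha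
  set k : Int := (lo + (n : Int) - 1) / 13 with hk
  have hE : (2 * lo + (n : Int) - 1) * (n : Int)
      = (lo + (lo + (n : Int) - 1)) * ((lo + (n : Int) - 1) - lo + 1) := by ring
  rw [hE] at hkey
  obtain ⟨m, hm⟩ := pvEven a k
  have hM : 13 * (a + k) * (k - a + 1) = 2 * (13 * m) := by
    rw [mul_assoc, hm]; ring
  rw [hM] at hkey ⊢
  generalize hEE : (lo + (lo + (n : Int) - 1)) * ((lo + (n : Int) - 1) - lo + 1) = E at hkey ⊢
  omega

-- ===== VERDICT (by name: the statement is the Claim_ definition above) =====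
theorem soma_nao_divisiveis_treze_spec : Claim_equal_soma_nao_divisiveis_treze := by
  unfold Claim_equal_soma_nao_divisiveis_treze Spec_soma_nao_divisiveis_treze
  intro n1 n2 _
  unfold soma_nao_divisiveis_treze soma_nao_divisiveis_treze_alt
  by_cases h : n2 < n1
  · simp only [if_pos h]
    exact pvMain n2 n1 (le_of_lt h)
  · simp only [if_neg h]
    exact pvMain n1 n2 (by omega)
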